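-- pv_equiv track=rewrite | github.com/kvant-kpfu/find-pair-game | fibonachy.py | sum_fib
-- ===== SOURCE A (Python) =====
-- def f(n):
--     if n in (1, 2):
--         return 1
--     return f(n - 1) + f(n - 2)
--
-- def sum_fib(l, r):
--     total = 0
--     n = 1
--     while True:
--         fib = f(n)
--         if fib > r:
--             break
--         if fib >= l:
--             total += fib
--         n += 1
--     return total
-- ===== SOURCE B (Python) =====
-- def sum_fib(l, r):
--     total = 0
--     a, b = 1, 1
--     while a <= r:
--         if a >= l:
--             total += a
--         a, b = b, a + b
--     return total
-- ===== Notes on version B (the rewrite author's own statement) =====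
-- stated objective: faster
-- what changed: B iterates the Fibonacci sequence once with a running pair (a, b) instead of recomputing each Fibonacci number with naive exponential recursion f(n).
import Mathlib
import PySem

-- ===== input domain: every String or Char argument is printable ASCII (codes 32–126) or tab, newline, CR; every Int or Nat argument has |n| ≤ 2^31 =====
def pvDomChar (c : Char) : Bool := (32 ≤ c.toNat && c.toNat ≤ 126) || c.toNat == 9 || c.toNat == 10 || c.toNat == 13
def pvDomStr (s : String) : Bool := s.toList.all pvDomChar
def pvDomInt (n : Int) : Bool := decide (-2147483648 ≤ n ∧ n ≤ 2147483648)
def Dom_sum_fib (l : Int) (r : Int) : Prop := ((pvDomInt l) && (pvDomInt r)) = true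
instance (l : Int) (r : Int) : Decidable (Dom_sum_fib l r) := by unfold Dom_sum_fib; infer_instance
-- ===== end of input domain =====

-- B replaces A's naive exponential recursion f(n) per loop step by a single running-pair
-- Fibonacci iteration (objective: faster, asymptotic).

-- ===== PORT A =====
-- Python's f diverges for n ≤ 0; sum_fib only ever calls f with n ≥ 1, where goA is exact
-- (goA 0 = 0 is an arbitrary value for the unreachable argument).
def goA : Nat → Nat
  | 0 => 0
  | 1 => 1
  | 2 => 1
  | n + 3 => goA (n + 2) + goA (n + 1)

def fA (n : Int) : Int := (goA n.toNat : Int)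

-- A's 'while True' loop; the fuel argument only makes the same computation total:
-- fA n ≥ n - 1, so starting from n = 1 the loop breaks after at most (r + 1) iterations
-- and fuel (r + 2).toNat is never exhausted.
def loopA (l r : Int) : Nat → Int → Int → Int
  | 0, _, total => total
  | fuel + 1, n, total =>
      if fA n > r then total
      else loopA l r fuel (n + 1) (if fA n ≥ l then total + fA n else total)

def sum_fib (l : Int) (r : Int) : Int := loopA l r (r + 2).toNat 1 0

-- ===== PORT B =====
-- Source B's while loop over the running pair (a, b), with the same totality fuel as loopA;
-- b is carried as c with b = c + 1 (b ≥ 1 along the whole run).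
def loopB (l r : Int) : Nat → Nat → Nat → Int → Int
  | 0, _, _, total => total
  | fuel + 1, a, c, total =>
      if (a : Int) ≤ r then
        loopB l r fuel (c + 1) (a + c) (if (a : Int) ≥ l then total + (a : Int) else total)
      else total

def sum_fib_alt (l : Int) (r : Int) : Int := loopB l r (r + 2).toNat 1 0 0

-- ===== PRECONDITION & SPEC =====
def Spec_sum_fib (l : Int) (r : Int) (out : Int) : Prop := out = sum_fib_alt l r
instance (l : Int) (r : Int) (out : Int) : Decidable (Spec_sum_fib l r out) := by unfold Spec_sum_fib; infer_instance

-- ===== CLAIM (what is proved, stated in full; the proofs are below) =====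
def Claim_equal_sum_fib : Prop := ∀ (l : Int) (r : Int), Dom_sum_fib l r → Spec_sum_fib l r (sum_fib l r)

-- ===== LEMMAS AND PROOFS =====

theorem goA_pos : ∀ m : Nat, 1 ≤ m → 1 ≤ goA m := by
  intro m hm
  induction m using Nat.strong_induction_on with
  | _ m ih =>
    match m, hm with
    | 1, _ => simp [goA]
    | 2, _ => simp [goA]
    | n + 3, _ =>
      have h1 := ih (n + 2) (by omega) (by omega)
      simp only [goA]; omega

theorem goA_rec (m : Nat) (hm : 1 ≤ m) : goA (m + 2) = goA (m + 1) + goA m := by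
  match m, hm with
  | n + 1, _ => simp [goA]

-- with the SAME fuel, A's index loop and B's pair loop stay in lockstep:
-- B's state at index n is (goA n, goA (n+1))
theorem loop_eq (l r : Int) : ∀ (fuel : Nat) (n total : Int), 1 ≤ n →
    loopA l r fuel n total = loopB l r fuel (goA n.toNat) (goA (n.toNat + 1) - 1) total := by
  intro fuel
  induction fuel with
  | zero => intro n total _; rfl
  | succ fuel ih =>
    intro n total hn
    have hn1 : 1 ≤ n.toNat := by omega
    have hb1 := goA_pos (n.toNat + 1) (by omega)
    have hrec := goA_rec n.toNat hn1
    simp only [loopA, loopB]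
    by_cases hgt : fA n > r
    · rw [if_pos hgt, if_neg (by simp only [fA] at hgt; omega)]
    · have hle : (goA n.toNat : Int) ≤ r := by simp only [fA] at hgt; omega
      rw [if_neg hgt, if_pos hle]
      rw [ih (n + 1) _ (by omega)]
      have hnt : (n + 1).toNat = n.toNat + 1 := by omega
      rw [hnt]
      have harg : goA (n.toNat + 1) - 1 + 1 = goA (n.toNat + 1) := by omega
      have harg2 : goA n.toNat + (goA (n.toNat + 1) - 1) = goA (n.toNat + 2) - 1 := by omega
      rw [harg, harg2]
      congr 1

-- ===== VERDICT (by name: the statement is the Claim_ definition above) =====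
theorem sum_fib_spec : Claim_equal_sum_fib := by
  intro l r _
  unfold Spec_sum_fib sum_fib sum_fib_alt
  rw [loop_eq l r (r + 2).toNat 1 0 (by omega)]
  norm_num [goA]
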